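-- pv_equiv track=rewrite | github.com/alexseitsinger/django-rest-framework-helpers | src/rest_framework_helpers/utils.py | get_mapped_path
-- ===== SOURCE A (Python) =====
-- def get_mapped_path(od):
--     bits = []
--     for k, v in od.items():
--         if v is True:
--             bits.append(k)
--         elif len(bits):
--             break
--     return ".".join(bits)
-- ===== SOURCE B (Python) =====
-- def get_mapped_path(od):
--     keys = list(od)
--     flags = [v is True for v in od.values()]
--     try:
--         start = flags.index(True)
--     except ValueError:
--         return ""
--     tail = flags[start:]
--     try:
--         length = tail.index(False)
--     except ValueError:
--         length = len(tail)
--     return ".".join(keys[start:start + length])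
-- ===== Notes on version B (the rewrite author's own statement) =====
-- stated objective: alternative
-- what changed: B never accumulates keys element by element: it builds a flags list, locates the run boundaries numerically with two index() searches, and slices the key list once, while A loops with an accumulator and a break.
import Mathlib
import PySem

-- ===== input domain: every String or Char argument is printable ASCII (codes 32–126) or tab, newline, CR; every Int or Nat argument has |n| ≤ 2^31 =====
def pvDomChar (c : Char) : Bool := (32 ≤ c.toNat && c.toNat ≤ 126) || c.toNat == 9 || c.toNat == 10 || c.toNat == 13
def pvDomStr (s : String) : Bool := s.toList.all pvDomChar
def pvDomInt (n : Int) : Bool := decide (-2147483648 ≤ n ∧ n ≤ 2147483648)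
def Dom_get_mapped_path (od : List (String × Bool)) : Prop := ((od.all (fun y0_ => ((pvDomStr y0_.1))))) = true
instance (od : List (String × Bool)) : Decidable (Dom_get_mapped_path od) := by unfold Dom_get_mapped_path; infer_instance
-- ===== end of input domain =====

-- B locates the True-run boundaries with index searches over a flags list and slices the key
-- list once, instead of A's accumulator loop with a break (alternative decomposition, same cost).

-- ===== PORT A =====
-- loop with accumulator `bits`; `break` modeled by returning bits
def getMappedPathLoop : List (String × Bool) → List String → List String
  | [], bits => bits
  | (k, v) :: rest, bits =>
    if v = true then getMappedPathLoop rest (bits ++ [k])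
    else if bits.length ≠ 0 then bits
    else getMappedPathLoop rest bits

def get_mapped_path (od : List (String × Bool)) : String :=
  PySem.Str.join "." (getMappedPathLoop od [])

-- ===== PORT B =====
-- keys = list(od); flags = [v is True for v in od.values()]; start = flags.index(True)
-- (ValueError → ""); tail = flags[start:]; length = tail.index(False) (ValueError → len(tail));
-- return ".".join(keys[start:start + length])
def get_mapped_path_alt (od : List (String × Bool)) : String :=
  let keys := od.map Prod.fst
  let flags := od.map Prod.snd
  match PySem.List.index? flags true with
  | none => ""
  | some start =>
    let tail := PySem.List.slice flags (some (start : Int)) none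
    let length : Nat :=
      match PySem.List.index? tail false with
      | none => tail.length
      | some l => l
    PySem.Str.join "." (PySem.List.slice keys (some (start : Int)) (some ((start : Int) + (length : Int))))

-- ===== PRECONDITION & SPEC =====
def Spec_get_mapped_path (od : List (String × Bool)) (out : String) : Prop := out = get_mapped_path_alt od
instance (od : List (String × Bool)) (out : String) : Decidable (Spec_get_mapped_path od out) := by unfold Spec_get_mapped_path; infer_instance

-- ===== CLAIM (what is proved, stated in full; the proofs are below) =====
def Claim_equal_get_mapped_path : Prop := ∀ (od : List (String × Bool)), Dom_get_mapped_path od → Spec_get_mapped_path od (get_mapped_path od)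

-- ===== LEMMAS AND PROOFS =====

-- A's loop, once the accumulator is non-empty, appends exactly the leading True-run keys.
theorem loop_nonempty (l : List (String × Bool)) (bits : List String) (h : bits ≠ []) :
    getMappedPathLoop l bits = bits ++ (l.takeWhile (fun kv => kv.2 = true)).map Prod.fst := by
  induction l generalizing bits with
  | nil => simp [getMappedPathLoop]
  | cons hd tl ih =>
    obtain ⟨k, v⟩ := hd
    by_cases hv : v = true
    · simp [getMappedPathLoop, hv, List.takeWhile, ih (bits ++ [k]) (by simp)]
    · simp [getMappedPathLoop, hv, List.takeWhile, List.length_eq_zero_iff, h]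

-- A's result list is the first contiguous True run.
theorem loop_nil (l : List (String × Bool)) :
    getMappedPathLoop l [] =
      ((l.dropWhile (fun kv => kv.2 ≠ true)).takeWhile (fun kv => kv.2 = true)).map Prod.fst := by
  induction l with
  | nil => simp [getMappedPathLoop]
  | cons hd tl ih =>
    obtain ⟨k, v⟩ := hd
    by_cases hv : v = true
    · simp [getMappedPathLoop, hv, List.dropWhile,
        loop_nonempty tl [k] (by simp)]
    · simp [getMappedPathLoop, hv, List.dropWhile, ih]

-- taking keys up to the first False flag is taking keys while the flag is True
theorem take_firstFalse (l : List (String × Bool)) :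
    (l.map Prod.fst).take
        (match PySem.List.index? (l.map Prod.snd) false with
         | none => (l.map Prod.snd).length
         | some l => l)
      = (l.takeWhile (fun kv => kv.2 = true)).map Prod.fst := by
  induction l with
  | nil => simp
  | cons hd tl ih =>
    obtain ⟨k, v⟩ := hd
    by_cases hv : v = true
    · subst hv
      simp only [List.map_cons]
      rw [PySem.List.index?_cons_of_ne (List.map Prod.snd tl) (by decide : (true:Bool) ≠ false)]
      cases htl : PySem.List.index? (List.map Prod.snd tl) false with
      | none =>
        rw [htl] at ih
        simp only [htl, Option.map_none, List.takeWhile_cons] at *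
        simpa using ih
      | some m =>
        rw [htl] at ih
        simp only [htl, Option.map_some, List.takeWhile_cons] at *
        simpa using ih
    · simp only [Bool.not_eq_true] at hv
      subst hv
      simp only [List.map_cons]
      rw [PySem.List.index?_cons_self]
      simp

-- B's index-and-slice pipeline produces the same run as A's loop characterisation.
theorem alt_eq (od : List (String × Bool)) :
    get_mapped_path_alt od =
      PySem.Str.join "."
        (((od.dropWhile (fun kv => kv.2 ≠ true)).takeWhile (fun kv => kv.2 = true)).map Prod.fst) := by
  induction od with
  | nil => simp [get_mapped_path_alt, PySem.List.index?, PySem.Str.join]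
  | cons hd tl ih =>
    obtain ⟨k, v⟩ := hd
    by_cases hv : v = true
    · subst hv
      unfold get_mapped_path_alt
      simp only [List.map_cons]
      rw [PySem.List.index?_cons_self]
      simp only [Nat.cast_zero, PySem.List.slice_zero_start, PySem.List.slice_none_none, zero_add]
      rw [PySem.List.slice_to_natCast]
      have h := take_firstFalse ((k, true) :: tl)
      simp only [List.map_cons] at h
      rw [h]
      simp
    · simp only [Bool.not_eq_true] at hv
      subst hv
      simp only [get_mapped_path_alt, List.map_cons] at ih ⊢
      rw [PySem.List.index?_cons_of_ne (List.map Prod.snd tl) (by decide : (false:Bool) ≠ true)]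
      rw [List.dropWhile_cons]
      cases htl : PySem.List.index? (List.map Prod.snd tl) true with
      | none =>
        rw [htl] at ih
        simpa using ih
      | some s =>
        rw [htl] at ih
        simp only [Option.map_some]
        simp only [PySem.List.slice_from_natCast, PySem.List.slice_natCast_add,
          List.drop_succ_cons] at ih ⊢
        simpa using ih

-- ===== VERDICT (by name: the statement is the Claim_ definition above) =====
theorem get_mapped_path_spec : Claim_equal_get_mapped_path := by
  intro od _
  unfold Spec_get_mapped_path get_mapped_path
  rw [loop_nil, alt_eq]
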